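-- pv_equiv track=rewrite | github.com/arvind-itt/food-recommendation | recommendation-engine/recommendation_system.py | _calculate_item_scores
-- ===== SOURCE A (Python) =====
-- def _calculate_item_scores(feedback_data, exclude_items):
--     items = {}
--     for item in feedback_data:
--         if item[0] not in exclude_items:
--             if item[0] not in items:
--                 items[item[0]] = {'total_score': 0, 'count': 0}
--             items[item[0]]['total_score'] += item[1] * item[2]
--             items[item[0]]['count'] += 1
--     return items
-- ===== SOURCE B (Python) =====
-- def _calculate_item_scores(feedback_data, exclude_items):
--     # Phase 1: ordered list of distinct, non-excluded keys (first-seen order).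
--     keys = []
--     for item in feedback_data:
--         if item[0] not in exclude_items and item[0] not in keys:
--             keys.append(item[0])
--     # Phase 2: for each key, scan the whole list to sum weighted scores and count.
--     return {
--         k: {
--             'total_score': sum(item[1] * item[2] for item in feedback_data if item[0] == k),
--             'count': sum(1 for item in feedback_data if item[0] == k),
--         }
--         for k in keys
--     }
-- ===== Notes on version B (the rewrite author's own statement) =====
-- stated objective: alternative
-- what changed: B replaces A's single-pass nested-dict accumulation with a two-phase algorithm: it first collects the ordered list of distinct non-excluded keys, then computes each key's weighted total and count by a dedicated scan of the whole list (group-by-key via per-key scans, no accumulator dict).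
import Mathlib
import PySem

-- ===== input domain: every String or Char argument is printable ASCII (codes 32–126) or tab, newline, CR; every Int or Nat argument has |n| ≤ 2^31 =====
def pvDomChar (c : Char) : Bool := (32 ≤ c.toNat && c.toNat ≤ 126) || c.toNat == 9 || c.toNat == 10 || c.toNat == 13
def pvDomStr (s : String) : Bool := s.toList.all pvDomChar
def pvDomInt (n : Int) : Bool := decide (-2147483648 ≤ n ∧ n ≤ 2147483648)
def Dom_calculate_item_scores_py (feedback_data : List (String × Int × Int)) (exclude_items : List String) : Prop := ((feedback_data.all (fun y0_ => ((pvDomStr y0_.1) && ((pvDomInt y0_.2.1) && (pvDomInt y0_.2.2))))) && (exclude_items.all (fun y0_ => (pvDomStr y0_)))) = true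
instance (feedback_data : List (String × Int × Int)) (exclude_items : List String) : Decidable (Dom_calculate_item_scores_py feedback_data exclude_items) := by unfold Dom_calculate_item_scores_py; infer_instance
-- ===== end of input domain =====

-- B is a two-phase algorithm (collect distinct included keys, then per-key scans of the whole
-- list) instead of A's single-pass nested-dict accumulation; objective: alternative.

-- ===== PORT A =====
-- one iteration of A's loop body (the nested-dict update)
def pvAStep (exclude_items : List String) (d : PySem.Dict String (PySem.Dict String Int))
    (item : String × Int × Int) : PySem.Dict String (PySem.Dict String Int) :=
  if !(exclude_items.contains item.1) then
    let d0 := if !(d.contains item.1) then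
        d.insert item.1 (PySem.Dict.ofList [("total_score", (0 : Int)), ("count", (0 : Int))])
      else d
    let d1 := d0.modify item.1 PySem.Dict.empty
        (fun inner => inner.modify "total_score" 0 (· + item.2.1 * item.2.2))
    d1.modify item.1 PySem.Dict.empty (fun inner => inner.modify "count" 0 (· + 1))
  else d

def calculate_item_scores_py (feedback_data : List (String × Int × Int)) (exclude_items : List String) : List (String × List (String × Int)) :=
  let items := feedback_data.foldl (pvAStep exclude_items) PySem.Dict.empty
  items.items.map (fun p => (p.1, p.2.items))

-- ===== PORT B =====
-- phase 1: first-seen-order distinct non-excluded keys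
def pvKeys (exclude_items : List String) (feedback_data : List (String × Int × Int)) : List String :=
  feedback_data.foldl
    (fun acc item =>
      if !(exclude_items.contains item.1) && !(acc.contains item.1) then acc ++ [item.1] else acc)
    []

-- phase 2 helpers: sum(item[1]*item[2] for item in fd if item[0] == k) and sum(1 for …)
def pvSum (k : String) (feedback_data : List (String × Int × Int)) : Int :=
  (feedback_data.filter (fun it => it.1 == k)).foldl (fun s it => s + it.2.1 * it.2.2) 0

def pvCnt (k : String) (feedback_data : List (String × Int × Int)) : Int :=
  (feedback_data.filter (fun it => it.1 == k)).foldl (fun c _ => c + 1) 0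

def calculate_item_scores_py_alt (feedback_data : List (String × Int × Int)) (exclude_items : List String) : List (String × List (String × Int)) :=
  (pvKeys exclude_items feedback_data).map
    (fun k => (k, [("total_score", pvSum k feedback_data), ("count", pvCnt k feedback_data)]))

-- ===== PRECONDITION & SPEC =====
def Spec_calculate_item_scores_py (feedback_data : List (String × Int × Int)) (exclude_items : List String) (out : List (String × List (String × Int))) : Prop := out = calculate_item_scores_py_alt feedback_data exclude_items
instance (feedback_data : List (String × Int × Int)) (exclude_items : List String) (out : List (String × List (String × Int))) : Decidable (Spec_calculate_item_scores_py feedback_data exclude_items out) := by unfold Spec_calculate_item_scores_py; infer_instance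

-- ===== CLAIM (what is proved, stated in full; the proofs are below) =====
def Claim_equal_calculate_item_scores_py : Prop := ∀ (feedback_data : List (String × Int × Int)) (exclude_items : List String), Dom_calculate_item_scores_py feedback_data exclude_items → Spec_calculate_item_scores_py feedback_data exclude_items (calculate_item_scores_py feedback_data exclude_items)

-- ===== LEMMAS AND PROOFS =====

theorem pvInner_ts (s c w : Int) :
    (PySem.Dict.mk [("total_score", s), ("count", c)]).modify "total_score" 0 (· + w)
      = PySem.Dict.mk [("total_score", s + w), ("count", c)] := by
  simp [PySem.Dict.modify, PySem.Dict.insert, PySem.Dict.get?, PySem.Dict.getD, PySem.Dict.contains]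

theorem pvInner_cnt (s c w : Int) :
    (PySem.Dict.mk [("total_score", s), ("count", c)]).modify "count" 0 (· + w)
      = PySem.Dict.mk [("total_score", s), ("count", c + w)] := by
  simp [PySem.Dict.modify, PySem.Dict.insert, PySem.Dict.get?, PySem.Dict.getD, PySem.Dict.contains]

theorem pvKeys_append (ex : List String) (l : List (String × Int × Int)) (x : String × Int × Int) :
    pvKeys ex (l ++ [x])
      = if !(ex.contains x.1) && !((pvKeys ex l).contains x.1)
          then pvKeys ex l ++ [x.1] else pvKeys ex l := by
  simp [pvKeys, List.foldl_append]

theorem pvSum_append (k : String) (l : List (String × Int × Int)) (x : String × Int × Int) :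
    pvSum k (l ++ [x]) = if x.1 == k then pvSum k l + x.2.1 * x.2.2 else pvSum k l := by
  by_cases h : x.1 == k <;> simp [pvSum, List.filter_append, List.foldl_append, h]

theorem pvCnt_append (k : String) (l : List (String × Int × Int)) (x : String × Int × Int) :
    pvCnt k (l ++ [x]) = if x.1 == k then pvCnt k l + 1 else pvCnt k l := by
  by_cases h : x.1 == k <;> simp [pvCnt, List.filter_append, List.foldl_append, h]

-- loop invariant relating A's accumulator after the prefix l to B's per-key scans over l
def pvInv (ex : List String) (l : List (String × Int × Int)) : Prop :=
  let d := l.foldl (pvAStep ex) PySem.Dict.empty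
  d.keys = pvKeys ex l ∧ d.keys.Nodup ∧
  (∀ k ∈ d.keys, ex.contains k = false) ∧
  (∀ j, ex.contains j = false → j ∉ d.keys → l.filter (fun it => it.1 == j) = []) ∧
  (∀ k ∈ d.keys, d.getD k PySem.Dict.empty
      = PySem.Dict.mk [("total_score", pvSum k l), ("count", pvCnt k l)])

theorem pvInv_holds (ex : List String) (l : List (String × Int × Int)) : pvInv ex l := by
  induction l using List.reverseRecOn with
  | nil =>
      refine ⟨?_, ?_, ?_, ?_, ?_⟩ <;>
        simp [pvKeys, PySem.Dict.keys, PySem.Dict.empty]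
  | append_singleton l x ih =>
      obtain ⟨hk, hnd, hne, hmiss, hval⟩ := ih
      set d := l.foldl (pvAStep ex) PySem.Dict.empty with hd
      have hfold : (l ++ [x]).foldl (pvAStep ex) PySem.Dict.empty = pvAStep ex d x := by
        simp [List.foldl_append, hd]
      obtain ⟨kx, a, b⟩ := x
      unfold pvInv
      rw [hfold]
      unfold pvAStep
      cases hex : ex.contains kx with
      | true =>
        simp only [Bool.not_true, Bool.false_eq_true, if_false]
        have hkx_ne : ∀ k ∈ d.keys, (kx == k) = false := by
          intro k hkm
          have := hne k hkm
          simp only [beq_eq_false_iff_ne, ne_eq]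
          intro h; rw [h] at hex; rw [hex] at this; exact absurd this (by simp)
        refine ⟨?_, hnd, hne, ?_, ?_⟩
        · rw [hk, pvKeys_append, if_neg (by simp; intro hn; exact absurd (by simpa using hex) hn)]
        · intro j hj hjm
          rw [List.filter_append, hmiss j hj hjm]
          have : (kx == j) = false := by
            simp only [beq_eq_false_iff_ne, ne_eq]; intro h; rw [h] at hex; rw [hj] at hex; simp at hex
          simp [this]
        · intro k hkm
          rw [hval k hkm, pvSum_append, pvCnt_append, if_neg, if_neg]
          · simp [hkx_ne k hkm]
          · simp [hkx_ne k hkm]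
      | false =>
        simp only [Bool.not_false, if_true]
        cases hc : d.contains kx with
        | true =>
          simp only [Bool.not_true, Bool.false_eq_true, if_false]
          have hkm : kx ∈ d.keys := by
            have h1 := PySem.Dict.contains_eq_decide_mem_keys d kx
            rw [hc] at h1
            exact of_decide_eq_true h1.symm
          have hck1 : (d.modify kx PySem.Dict.empty
              (fun inner => inner.modify "total_score" 0 (· + a * b))).contains kx = true := by
            rw [PySem.Dict.contains_modify]; simp
          have hkeysA : ((d.modify kx PySem.Dict.empty
                (fun inner => inner.modify "total_score" 0 (· + a * b))).modify kx PySem.Dict.empty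
                (fun inner => inner.modify "count" 0 (· + 1))).keys = d.keys := by
            rw [PySem.Dict.keys_modify, PySem.Dict.keys_insert_of_contains _ _ hck1,
                PySem.Dict.keys_modify, PySem.Dict.keys_insert_of_contains _ _ hc]
          have hA : ∀ k', ((d.modify kx PySem.Dict.empty
                (fun inner => inner.modify "total_score" 0 (· + a * b))).modify kx PySem.Dict.empty
                (fun inner => inner.modify "count" 0 (· + 1))).getD k' PySem.Dict.empty
              = if k' = kx then
                  PySem.Dict.mk [("total_score", pvSum kx l + a * b), ("count", pvCnt kx l + 1)]
                else d.getD k' PySem.Dict.empty := by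
            intro k'
            rw [PySem.Dict.getD_modify, PySem.Dict.getD_modify]
            by_cases hkk : k' = kx
            · subst hkk
              simp only [if_true]
              rw [hval k' hkm, pvInner_ts, pvInner_cnt]
            · rw [if_neg hkk, if_neg hkk, PySem.Dict.getD_modify, if_neg hkk]
          have hkeysB : pvKeys ex (l ++ [(kx, a, b)]) = pvKeys ex l := by
            have hcx : (pvKeys ex l).contains kx = true := by
              rw [← hk]; exact List.elem_eq_true_of_mem hkm
            rw [pvKeys_append, if_neg (by simp; intro _; exact (by simpa using hcx))]
          refine ⟨by rw [hkeysA, hkeysB, hk], by rw [hkeysA]; exact hnd,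
                  by rw [hkeysA]; exact hne, ?_, ?_⟩
          · intro j hj hjm
            rw [hkeysA] at hjm
            rw [List.filter_append, hmiss j hj hjm]
            have : (kx == j) = false := by
              simp only [beq_eq_false_iff_ne, ne_eq]; intro h; exact hjm (h ▸ hkm)
            simp [this]
          · intro k hkm'
            rw [hkeysA] at hkm'
            rw [hA k, pvSum_append, pvCnt_append]
            by_cases hkk : k = kx
            · subst hkk; simp
            · have hbn : (kx == k) = false := by
                simp only [beq_eq_false_iff_ne, ne_eq]; intro h; exact hkk h.symm
              rw [if_neg hkk, hval k hkm']
              simp [hbn]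
        | false =>
          simp only [Bool.not_false, if_true]
          have hkm : kx ∉ d.keys := by
            have h1 := PySem.Dict.contains_eq_decide_mem_keys d kx
            rw [hc] at h1
            exact of_decide_eq_false h1.symm
          have hofl : PySem.Dict.ofList [("total_score", (0 : Int)), ("count", (0 : Int))]
              = PySem.Dict.mk [("total_score", (0 : Int)), ("count", (0 : Int))] := by decide
          have hck0 : (d.insert kx (PySem.Dict.ofList [("total_score", (0:Int)), ("count", (0:Int))])).contains kx = true :=
            PySem.Dict.contains_insert_self _ _ _
          have hck1 : ((d.insert kx (PySem.Dict.ofList [("total_score", (0:Int)), ("count", (0:Int))])).modify kx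
              PySem.Dict.empty (fun inner => inner.modify "total_score" 0 (· + a * b))).contains kx = true := by
            rw [PySem.Dict.contains_modify]; simp
          have hkeysA : (((d.insert kx (PySem.Dict.ofList [("total_score", 0), ("count", 0)])).modify kx
                PySem.Dict.empty
                (fun inner => inner.modify "total_score" 0 (· + a * b))).modify kx PySem.Dict.empty
                (fun inner => inner.modify "count" 0 (· + 1))).keys = d.keys ++ [kx] := by
            rw [PySem.Dict.keys_modify, PySem.Dict.keys_insert_of_contains _ _ hck1,
                PySem.Dict.keys_modify, PySem.Dict.keys_insert_of_contains _ _ hck0,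
                PySem.Dict.keys_insert_of_not_contains _ _ hc]
          have hA : ∀ k', (((d.insert kx (PySem.Dict.ofList [("total_score", 0), ("count", 0)])).modify kx
                PySem.Dict.empty
                (fun inner => inner.modify "total_score" 0 (· + a * b))).modify kx PySem.Dict.empty
                (fun inner => inner.modify "count" 0 (· + 1))).getD k' PySem.Dict.empty
              = if k' = kx then
                  PySem.Dict.mk [("total_score", (0 : Int) + a * b), ("count", (0 : Int) + 1)]
                else d.getD k' PySem.Dict.empty := by
            intro k'
            rw [PySem.Dict.getD_modify, PySem.Dict.getD_modify]
            by_cases hkk : k' = kx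
            · subst hkk
              simp only [if_true]
              rw [PySem.Dict.getD_insert, if_pos rfl, hofl, pvInner_ts, pvInner_cnt]
            · rw [if_neg hkk, if_neg hkk, PySem.Dict.getD_modify, if_neg hkk,
                  PySem.Dict.getD_insert, if_neg hkk]
          have hfilt0 : l.filter (fun it => it.1 == kx) = [] := hmiss kx hex hkm
          have hs0 : pvSum kx l = 0 := by rw [pvSum, hfilt0]; rfl
          have hc0 : pvCnt kx l = 0 := by rw [pvCnt, hfilt0]; rfl
          have hkeysB : pvKeys ex (l ++ [(kx, a, b)]) = pvKeys ex l ++ [kx] := by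
            have hnotin : kx ∉ pvKeys ex l := by rw [← hk]; exact hkm
            rw [pvKeys_append, if_pos (by simp; exact ⟨by simpa using hex, hnotin⟩)]
          refine ⟨by rw [hkeysA, hkeysB, hk], ?_, ?_, ?_, ?_⟩
          · rw [hkeysA]
            have hdis : ∀ y ∈ d.keys, ¬ y = kx := fun y hy hyk => hkm (hyk ▸ hy)
            simp [List.nodup_append, hnd]
            exact hdis
          · intro k hkm'
            rw [hkeysA] at hkm'
            rcases List.mem_append.mp hkm' with h | h
            · exact hne k h
            · rw [List.mem_singleton.mp h]; exact hex
          · intro j hj hjm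
            rw [hkeysA] at hjm
            have hjne : ¬ j = kx := fun h => hjm (List.mem_append.mpr (Or.inr (by simp [h])))
            have hjd : j ∉ d.keys := fun h => hjm (List.mem_append.mpr (Or.inl h))
            rw [List.filter_append, hmiss j hj hjd]
            have : (kx == j) = false := by
              simp only [beq_eq_false_iff_ne, ne_eq]; intro h; exact hjne h.symm
            simp [this]
          · intro k hkm'
            rw [hkeysA] at hkm'
            rw [hA k, pvSum_append, pvCnt_append]
            by_cases hkk : k = kx
            · subst hkk; simp [hs0, hc0]
            · have hkd : k ∈ d.keys := by
                rcases List.mem_append.mp hkm' with h | h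
                · exact h
                · exact absurd (List.mem_singleton.mp h) hkk
              have hbn : (kx == k) = false := by
                simp only [beq_eq_false_iff_ne, ne_eq]; intro h; exact hkk h.symm
              rw [if_neg hkk, hval k hkd]
              simp [hbn]

-- ===== VERDICT (by name: the statement is the Claim_ definition above) =====
theorem calculate_item_scores_py_spec : Claim_equal_calculate_item_scores_py := by
  intro fd ex _
  obtain ⟨hk, hnd, -, -, hval⟩ := pvInv_holds ex fd
  unfold Spec_calculate_item_scores_py calculate_item_scores_py calculate_item_scores_py_alt
  show ((fd.foldl (pvAStep ex) PySem.Dict.empty).items.map (fun p => (p.1, p.2.items)))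
      = (pvKeys ex fd).map
          (fun k => (k, [("total_score", pvSum k fd), ("count", pvCnt k fd)]))
  rw [PySem.Dict.items_eq_map_keys _ hnd PySem.Dict.empty, List.map_map, ← hk]
  refine List.map_congr_left ?_
  intro k hkm
  simp only [Function.comp]
  rw [hval k hkm]
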